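-- pv_equiv track=rewrite | github.com/eliottcassidy2000/math | 04-computation/max_H_circulant_p13.py | all_circulant_tournaments
-- ===== SOURCE A (Python) =====
-- def all_circulant_tournaments(p):
--     """Generate all circulant tournament connection sets on Z_p."""
--     m = (p - 1) // 2
--     pairs = [(s, p - s) for s in range(1, m + 1)]
--     # Choose one from each pair
--     result = []
--     for bits in range(1 << m):
--         S = []
--         for i, (a, b) in enumerate(pairs):
--             if bits & (1 << i):
--                 S.append(a)
--             else:
--                 S.append(b)
--         result.append(sorted(S))
--     return result
-- ===== SOURCE B (Python) =====
-- def all_circulant_tournaments(p):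
--     """Generate all circulant tournament connection sets on Z_p."""
--     m = (p - 1) // 2
--     # Doubling construction: after step i, res holds the 2^i choice outcomes for
--     # pairs (1,p-1)..(i,p-i) as (smalls, larges), both kept sorted; the value i is
--     # larger than every earlier small and p-i is smaller than every earlier large,
--     # so no sorting is ever needed, and the halves come in A's bit-count order
--     # (the choice for the newest pair varies slowest).
--     res = [([], [])]
--     for i in range(1, m + 1):
--         res = [(s, [p - i] + l) for (s, l) in res] + [(s + [i], l) for (s, l) in res]
--     return [s + l for (s, l) in res]
-- ===== Notes on version B (the rewrite author's own statement) =====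
-- stated objective: alternative
-- what changed: B replaces the 2^m bitmask enumeration with an inner per-pair scan and sort by a doubling (iterated cartesian-product) construction: starting from [([],[])] it doubles the list once per pair, prepending p-i to the large half or appending i to the small half, so each connection set is produced already sorted and no bitmask, pairs table or sort appears; same asymptotic cost dominated by the 2^m output lists.
-- outside the precondition, e.g. on all_circulant_tournaments(0): A raises ValueError, B returns [[]]
import Mathlib
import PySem

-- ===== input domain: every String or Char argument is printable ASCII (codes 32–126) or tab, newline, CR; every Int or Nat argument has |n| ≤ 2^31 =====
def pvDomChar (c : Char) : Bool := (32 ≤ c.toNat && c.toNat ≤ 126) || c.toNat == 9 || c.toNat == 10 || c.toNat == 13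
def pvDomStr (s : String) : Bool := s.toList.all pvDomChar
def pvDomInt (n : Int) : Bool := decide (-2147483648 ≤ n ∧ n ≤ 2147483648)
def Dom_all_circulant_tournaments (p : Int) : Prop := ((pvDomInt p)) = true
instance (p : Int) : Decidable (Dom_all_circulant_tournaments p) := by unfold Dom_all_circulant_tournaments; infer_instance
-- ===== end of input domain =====

-- B replaces A's bitmask enumeration (inner per-pair scan + sort) by a doubling construction:
-- the result list is doubled once per pair, keeping (smalls, larges) sorted by construction —
-- an alternative algorithm of the same cost (not measured faster).

-- ===== PORT A =====
-- literal port of A; `1 << i` is ported as `<<< ·.toNat` (the shift amounts m and i are ≥ 0 on Pre_)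
def all_circulant_tournaments (p : Int) : List (List Int) :=
  let m := PySem.Int.floordiv (p - 1) 2
  let pairs := (PySem.List.pyRange 1 (m + 1) 1).map (fun s => (s, p - s))
  (PySem.List.pyRange 0 ((1 : Int) <<< m.toNat) 1).foldl (fun (result : List (List Int)) (bits : Int) =>
    let S := (PySem.List.enumerate pairs 0).foldl (fun (S : List Int) (x : Int × Int × Int) =>
      if PySem.Int.band bits ((1 : Int) <<< x.1.toNat) ≠ 0 then S ++ [x.2.1] else S ++ [x.2.2]) []
    result ++ [PySem.List.sorted S (fun y => y) false]) []

-- ===== PORT B =====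
def all_circulant_tournaments_alt (p : Int) : List (List Int) :=
  let m := PySem.Int.floordiv (p - 1) 2
  let res := (PySem.List.pyRange 1 (m + 1) 1).foldl
    (fun (res : List (List Int × List Int)) (i : Int) =>
      res.map (fun sl => (sl.1, (p - i) :: sl.2)) ++ res.map (fun sl => (sl.1 ++ [i], sl.2)))
    [(([] : List Int), ([] : List Int))]
  res.map (fun sl => sl.1 ++ sl.2)

-- ===== PRECONDITION & SPEC =====
-- Python A raises ValueError ('negative shift count') for p ≤ 0: 1 << m with m = (p-1)//2 < 0.
def Pre_all_circulant_tournaments (p : Int) : Prop := 1 ≤ p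
instance (p : Int) : Decidable (Pre_all_circulant_tournaments p) := by unfold Pre_all_circulant_tournaments; infer_instance
def pvWitness_all_circulant_tournaments : Int := (7)
def Spec_all_circulant_tournaments (p : Int) (out : List (List Int)) : Prop := out = all_circulant_tournaments_alt p
instance (p : Int) (out : List (List Int)) : Decidable (Spec_all_circulant_tournaments p out) := by unfold Spec_all_circulant_tournaments; infer_instance

-- ===== CLAIM (what is proved, stated in full; the proofs are below) =====
def Claim_equal_all_circulant_tournaments : Prop := ∀ (p : Int), Dom_all_circulant_tournaments p → Pre_all_circulant_tournaments p → Spec_all_circulant_tournaments p (all_circulant_tournaments p)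

-- ===== LEMMAS AND PROOFS =====

-- the bit test of A's inner loop, as a Bool on a Nat bit index
def pvC (bits : Int) (k : Nat) : Bool := PySem.Int.band (bits >>> k) 1 != 0
-- the element A appends for pair index k
def pvF (p bits : Int) (k : Nat) : Int := if pvC bits k then (k : Int) + 1 else p - ((k : Int) + 1)
def pvSmall (bits : Int) (n : Nat) : List Int :=
  ((List.range n).filter (pvC bits)).map (fun (k : Nat) => (k : Int) + 1)
def pvLarge (p bits : Int) (n : Nat) : List Int :=
  ((List.range n).filter (fun k => !pvC bits k)).map (fun (k : Nat) => p - ((k : Int) + 1))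

-- pvC on a cast Nat is testBit
lemma pvC_natCast (b : Nat) (k : Nat) : pvC (b : Int) k = b.testBit k := by
  rw [pvC, show ((b : Int) >>> k) = ((b >>> k : Nat) : Int) from rfl,
    show (1 : Int) = ((1 : Nat) : Int) from rfl, PySem.Int.band_natCast]
  rw [Nat.testBit, Nat.and_one_is_mod, Nat.one_and_eq_mod_two]
  rcases Nat.mod_two_eq_zero_or_one (b >>> k) with h|h <;> rw [h] <;> rfl

-- A's test 'bits & (1 << k)' and the testBit form agree for bits ≥ 0
lemma pv_bit_iff (bits : Int) (hb : 0 ≤ bits) (k : Nat) :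
    (PySem.Int.band bits ((1 : Int) <<< k) ≠ 0) ↔ pvC bits k := by
  obtain ⟨b, rfl⟩ : ∃ b : Nat, bits = (b : Int) := ⟨bits.toNat, (Int.toNat_of_nonneg hb).symm⟩
  have h1 : ((1 : Int) <<< k) = ((1 <<< k : Nat) : Int) := by
    simp [Int.shiftLeft_eq, Nat.shiftLeft_eq]
  rw [h1, PySem.Int.band_natCast, pvC_natCast]
  simp only [ne_eq, Int.natCast_eq_zero]
  rw [Nat.one_shiftLeft, Nat.and_two_pow]
  rcases h : b.testBit k <;> simp [h]

-- closed form of A's inner loop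
lemma pv_innerA (p bits : Int) (hb : 0 ≤ bits) (n : Nat) :
    (PySem.List.enumerate ((PySem.List.pyRange 1 ((n : Int) + 1) 1).map (fun s => (s, p - s))) 0).foldl
      (fun (S : List Int) (x : Int × Int × Int) => if PySem.Int.band bits ((1 : Int) <<< x.1.toNat) ≠ 0 then S ++ [x.2.1] else S ++ [x.2.2]) []
    = (List.range n).map (pvF p bits) := by
  induction n with
  | zero =>
    rw [PySem.List.pyRange_one_eq_nil (by omega)]
    simp
  | succ n ih =>
    have hcast : ((n + 1 : Nat) : Int) + 1 = ((n : Int) + 1) + 1 := by push_cast; ring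
    rw [hcast, PySem.List.pyRange_one_succ_right (by omega), List.map_append,
      PySem.List.enumerate_append, List.foldl_append, ih]
    have hlen : ((PySem.List.pyRange 1 ((n : Int) + 1) 1).map (fun s => (s, p - s))).length = n := by
      simp [PySem.List.length_pyRange_one]
    rw [hlen, List.range_succ, List.map_append]
    simp only [List.map_cons, List.map_nil, PySem.List.enumerate, List.foldl_cons, List.foldl_nil]
    have hi : ((0 : Int) + (n : Int)).toNat = n := by omega
    rw [hi]
    by_cases hc : pvC bits n
    · rw [if_pos (by rw [pv_bit_iff bits hb n]; exact hc)]
      simp [pvF, hc]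
    · rw [if_neg (by rw [pv_bit_iff bits hb n]; exact hc)]
      simp [pvF, hc]

-- the sort A performs is exactly smalls ++ reversed larges
lemma pv_sorted (p bits : Int) (n : Nat) (hp : 2 * (n : Int) + 1 ≤ p) :
    PySem.List.sorted ((List.range n).map (pvF p bits)) (fun y => y) false
    = pvSmall bits n ++ (pvLarge p bits n).reverse := by
  apply PySem.List.sorted_eq_of_perm_of_pairwise_lt
  · -- permutation
    have hsm : pvSmall bits n = ((List.range n).filter (pvC bits)).map (pvF p bits) := by
      unfold pvSmall
      apply List.map_congr_left
      intro k hk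
      simp [pvF, (List.mem_filter.mp hk).2]
    have hlg : pvLarge p bits n
        = ((List.range n).filter (fun k => !pvC bits k)).map (pvF p bits) := by
      unfold pvLarge
      apply List.map_congr_left
      intro k hk
      have hneg : ¬ pvC bits k := by simpa using (List.mem_filter.mp hk).2
      simp [pvF, hneg]
    refine (List.Perm.append_left _ (List.reverse_perm _)).trans ?_
    rw [hsm, hlg, ← List.map_append]
    exact (List.filter_append_perm _ _).map _
  · -- strictly increasing
    rw [List.pairwise_append]
    refine ⟨?_, ?_, ?_⟩
    · unfold pvSmall
      rw [List.pairwise_map]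
      exact (List.Pairwise.sublist List.filter_sublist List.pairwise_lt_range).imp
        (fun {a b} h => by omega)
    · rw [List.pairwise_reverse]
      unfold pvLarge
      rw [List.pairwise_map]
      exact (List.Pairwise.sublist List.filter_sublist List.pairwise_lt_range).imp
        (fun {a b} h => by omega)
    · intro a ha b hb
      unfold pvSmall at ha
      unfold pvLarge at hb
      obtain ⟨k, hk, rfl⟩ := List.mem_map.mp ha
      obtain ⟨k', hk', rfl⟩ := List.mem_map.mp (List.mem_reverse.mp hb)
      have h1 : k < n := List.mem_range.mp (List.mem_filter.mp hk).1
      have h2 : k' < n := List.mem_range.mp (List.mem_filter.mp hk').1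
      omega

-- bits below 2^n do not set bit n; adding 2^n sets it and keeps the low bits
lemma pvC_low (b : Nat) (n : Nat) (hb : b < 2 ^ n) : pvC (b : Int) n = false := by
  rw [pvC_natCast]; exact Nat.testBit_lt_two_pow hb
lemma pvC_high_top (b : Nat) (n : Nat) (hb : b < 2 ^ n) : pvC ((2 ^ n + b : Nat) : Int) n = true := by
  rw [pvC_natCast, Nat.testBit_two_pow_add_eq, Nat.testBit_lt_two_pow hb]; rfl
lemma pvC_high_low (b : Nat) (n k : Nat) (hk : k < n) :
    pvC ((2 ^ n + b : Nat) : Int) k = pvC (b : Int) k := by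
  rw [pvC_natCast, pvC_natCast, Nat.testBit_two_pow_add_gt hk]

-- how the small/large halves grow at pair index n, as functions of the bit there
lemma pvSmall_succ_true (bits : Int) (n : Nat) (ht : pvC bits n = true) :
    pvSmall bits (n + 1) = pvSmall bits n ++ [(n : Int) + 1] := by
  simp [pvSmall, List.range_succ, List.filter_append, ht]
lemma pvSmall_succ_false (bits : Int) (n : Nat) (hf : pvC bits n = false) :
    pvSmall bits (n + 1) = pvSmall bits n := by
  simp [pvSmall, List.range_succ, List.filter_append, hf]
lemma pvLarge_succ_true (p bits : Int) (n : Nat) (ht : pvC bits n = true) :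
    pvLarge p bits (n + 1) = pvLarge p bits n := by
  simp [pvLarge, List.range_succ, List.filter_append, ht]
lemma pvLarge_succ_false (p bits : Int) (n : Nat) (hf : pvC bits n = false) :
    pvLarge p bits (n + 1) = pvLarge p bits n ++ [p - ((n : Int) + 1)] := by
  simp [pvLarge, List.range_succ, List.filter_append, hf]

-- pvSmall/pvLarge only read the first n bits
lemma pvSmall_congr (bits bits' : Int) (n : Nat) (h : ∀ k < n, pvC bits k = pvC bits' k) :
    pvSmall bits n = pvSmall bits' n := by
  unfold pvSmall
  rw [List.filter_congr (fun k hk => by rw [h k (List.mem_range.mp hk)])]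
lemma pvLarge_congr (p bits bits' : Int) (n : Nat) (h : ∀ k < n, pvC bits k = pvC bits' k) :
    pvLarge p bits n = pvLarge p bits' n := by
  unfold pvLarge
  rw [List.filter_congr (fun k hk => by rw [h k (List.mem_range.mp hk)])]

-- closed form of B's doubling loop
lemma pv_resB (p : Int) (n : Nat) :
    (PySem.List.pyRange 1 ((n : Int) + 1) 1).foldl
      (fun (res : List (List Int × List Int)) (i : Int) =>
        res.map (fun sl => (sl.1, (p - i) :: sl.2)) ++ res.map (fun sl => (sl.1 ++ [i], sl.2)))
      [(([] : List Int), ([] : List Int))]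
    = (List.range (2 ^ n)).map (fun (b : Nat) => (pvSmall ((b : Nat) : Int) n, (pvLarge p ((b : Nat) : Int) n).reverse)) := by
  induction n with
  | zero =>
    rw [PySem.List.pyRange_one_eq_nil (by omega)]
    simp [pvSmall, pvLarge]
  | succ n ih =>
    have hcast : ((n + 1 : Nat) : Int) + 1 = ((n : Int) + 1) + 1 := by push_cast; ring
    rw [hcast, PySem.List.pyRange_one_succ_right (by omega), List.foldl_append, ih,
      List.foldl_cons, List.foldl_nil]
    rw [show 2 ^ (n + 1) = 2 ^ n + 2 ^ n by ring, List.range_add, List.map_append]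
    simp only [List.map_map]
    congr 1
    · apply List.map_congr_left
      intro b hb
      have hb' : b < 2 ^ n := List.mem_range.mp hb
      have h0 : pvC (b : Int) n = false := pvC_low b n hb'
      simp only [Function.comp]
      rw [pvSmall_succ_false _ _ h0, pvLarge_succ_false _ _ _ h0]
      simp
    · apply List.map_congr_left
      intro b hb
      have hb' : b < 2 ^ n := List.mem_range.mp hb
      have h1 : pvC ((2 ^ n + b : Nat) : Int) n = true := pvC_high_top b n hb'
      have hlow : ∀ k < n, pvC ((2 ^ n + b : Nat) : Int) k = pvC (b : Int) k :=
        fun k hk => pvC_high_low b n k hk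
      simp only [Function.comp]
      rw [pvSmall_succ_true _ _ h1, pvLarge_succ_true _ _ _ h1,
        pvSmall_congr _ _ _ hlow, pvLarge_congr _ _ _ _ hlow]

-- ===== VERDICT (by name: the statement is the Claim_ definition above) =====
theorem all_circulant_tournaments_spec : Claim_equal_all_circulant_tournaments := by
  intro p _ hpre
  unfold Pre_all_circulant_tournaments at hpre
  obtain ⟨n, hn⟩ : ∃ n : Nat, (p - 1) / 2 = (n : Int) :=
    ⟨((p - 1) / 2).toNat, (Int.toNat_of_nonneg (by omega)).symm⟩
  have hmp' : 2 * (n : Int) + 1 ≤ p := by omega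
  unfold Spec_all_circulant_tournaments
  simp only [all_circulant_tournaments, all_circulant_tournaments_alt]
  rw [PySem.Int.floordiv_eq_ediv_of_pos (by omega : (0:Int) < 2), hn]
  have hshift : ((1 : Int) <<< ((n : Int)).toNat) = ((2 ^ n : Nat) : Int) := by
    rw [Int.toNat_natCast]
    simp [Int.shiftLeft_eq]
  rw [hshift, PySem.List.pyRange_zero_natCast, pv_resB p n,
    PySem.List.foldl_append_singleton_eq_map]
  simp only [List.map_map]
  apply List.map_congr_left
  intro b hb
  simp only [Function.comp]
  rw [pv_innerA p (b : Int) (by positivity) n, pv_sorted p (b : Int) n hmp']
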